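-- pv_equiv track=rewrite | github.com/bemodestdoteth/getgrass-py | src/tg.py | parse_markdown_v2
-- ===== SOURCE A (Python) =====
-- def parse_markdown_v2(msg, exclude=None):
--     reserved_words = ['_', '*', '[', ']', '(', ')', '~', '`', '>', '#', '+', '-', '=', '|', '{', '}', '.', '!']
--     if exclude:
--         for exclude_word in exclude:
--             reserved_words.remove(exclude_word)
--     for reserved_word in reserved_words:
--         msg = str(msg).replace(reserved_word, "\{}".format(reserved_word))
--     return msg
-- ===== SOURCE B (Python) =====
-- def parse_markdown_v2(msg, exclude=None):
--     reserved = [c for c in '_*[]()~`>#+-=|{}.!' if not (exclude and c in exclude)]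
--     return ''.join('\\' + c if c in reserved else c for c in str(msg))
-- ===== Notes on version B (the rewrite author's own statement) =====
-- stated objective: idiomatic
-- what changed: Replaces A's 18 sequential whole-string .replace passes by a single left-to-right scan over the message that prefixes a backslash to each character in the remaining reserved set, built once by filtering the reserved characters against exclude.
import Mathlib
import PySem

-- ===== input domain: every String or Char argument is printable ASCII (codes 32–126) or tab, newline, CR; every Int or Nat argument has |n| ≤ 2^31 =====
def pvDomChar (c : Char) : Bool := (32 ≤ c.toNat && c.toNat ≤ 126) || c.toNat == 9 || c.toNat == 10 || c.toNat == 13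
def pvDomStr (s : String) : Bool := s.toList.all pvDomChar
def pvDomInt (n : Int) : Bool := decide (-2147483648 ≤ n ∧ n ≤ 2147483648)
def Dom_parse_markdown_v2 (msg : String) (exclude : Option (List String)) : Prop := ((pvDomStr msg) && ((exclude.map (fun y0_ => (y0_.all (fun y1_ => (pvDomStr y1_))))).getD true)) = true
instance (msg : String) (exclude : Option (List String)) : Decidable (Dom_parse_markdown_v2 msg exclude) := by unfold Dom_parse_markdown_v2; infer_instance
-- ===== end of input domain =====

-- B replaces A's 18 sequential whole-string `replace` passes by one left-to-right scan escaping
-- each reserved character (objective: idiomatic single pass; equal return values on Pre_).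

-- ===== PORT A =====
def pvReservedA : List String :=
  ["_", "*", "[", "]", "(", ")", "~", "`", ">", "#", "+", "-", "=", "|", "{", "}", ".", "!"]

-- A raises ValueError when list.remove misses; Pre_ excludes that, the port keeps acc unchanged there.
def parse_markdown_v2 (msg : String) (exclude : Option (List String)) : String :=
  let reserved_words : List String :=
    match exclude with
    | some l => if l ≠ [] then l.foldl (fun acc w => (PySem.List.remove? acc w).getD acc) pvReservedA
                else pvReservedA
    | none => pvReservedA
  reserved_words.foldl (fun m w => PySem.Str.replace m w ("\\" ++ w)) msg

-- ===== PORT B =====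
def parse_markdown_v2_alt (msg : String) (exclude : Option (List String)) : String :=
  let reserved : List Char :=
    ("_*[]()~`>#+-=|{}.!".toList).filter (fun c =>
      !(match exclude with
        | some l => !l.isEmpty && l.contains (String.ofList [c])
        | none => false))
  String.ofList (msg.toList.flatMap (fun c => if reserved.contains c then ['\\', c] else [c]))

-- ===== PRECONDITION & SPEC =====
-- Pre_ excludes exactly the inputs where A's list.remove raises ValueError: a truthy exclude with a
-- duplicate or with a word that is not one of the 18 reserved one-character strings.
def Pre_parse_markdown_v2 (msg : String) (exclude : Option (List String)) : Prop :=
  (exclude.getD []).Nodup ∧ ∀ w ∈ exclude.getD [], w ∈ (["_", "*", "[", "]", "(", ")", "~", "`", ">", "#", "+", "-", "=", "|", "{", "}", ".", "!"] : List String)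
instance (msg : String) (exclude : Option (List String)) : Decidable (Pre_parse_markdown_v2 msg exclude) := by unfold Pre_parse_markdown_v2; infer_instance

def pvWitness_parse_markdown_v2 : String × Option (List String) := ("a.b!", some ["."])


def Spec_parse_markdown_v2 (msg : String) (exclude : Option (List String)) (out : String) : Prop := out = parse_markdown_v2_alt msg exclude
instance (msg : String) (exclude : Option (List String)) (out : String) : Decidable (Spec_parse_markdown_v2 msg exclude out) := by unfold Spec_parse_markdown_v2; infer_instance

-- ===== CLAIM (what is proved, stated in full; the proofs are below) =====
def Claim_equal_parse_markdown_v2 : Prop := ∀ (msg : String) (exclude : Option (List String)), Dom_parse_markdown_v2 msg exclude → Pre_parse_markdown_v2 msg exclude → Spec_parse_markdown_v2 msg exclude (parse_markdown_v2 msg exclude)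

-- ===== LEMMAS AND PROOFS =====

-- replace with a single-character pattern = flatMap substitution
theorem pv_go_single (c : Char) (new : List Char) :
    ∀ (fuel : Nat) (l acc : List Char), l.length ≤ fuel →
      PySem.Chars.replace.go [c] new fuel l acc =
        acc.reverse ++ l.flatMap (fun a => if a = c then new else [a]) := by
  intro fuel
  induction fuel with
  | zero =>
    intro l acc h
    have : l = [] := List.eq_nil_of_length_eq_zero (Nat.le_zero.mp h)
    subst this
    simp [PySem.Chars.replace.go]
  | succ n ih =>
    intro l acc h
    cases l with
    | nil => simp [PySem.Chars.replace.go]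
    | cons a t =>
      have hpre : ([c].isPrefixOf (a :: t)) = (c == a) := by
        simp [List.isPrefixOf]
      by_cases hac : a = c
      · subst hac
        simp only [PySem.Chars.replace.go, hpre, beq_self_eq_true, if_true]
        rw [show List.drop [a].length (a :: t) = t from rfl]
        rw [ih t (new.reverse ++ acc) (by simpa using Nat.le_of_succ_le_succ h)]
        simp
      · have : (c == a) = false := beq_eq_false_iff_ne.mpr (fun hh => hac hh.symm)
        simp only [PySem.Chars.replace.go, hpre, this, if_false]
        rw [ih t (a :: acc) (by simpa using Nat.le_of_succ_le_succ h)]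
        simp [hac]

theorem pv_replace_single (s : List Char) (c : Char) (new : List Char) :
    PySem.Chars.replace s [c] new = s.flatMap (fun a => if a = c then new else [a]) := by
  simp only [PySem.Chars.replace, List.isEmpty]
  rw [pv_go_single c new s.length s [] (le_refl _)]
  simp

def pvEsc (P : List Char) (l : List Char) : List Char :=
  l.flatMap (fun a => if a ∈ P then ['\\', a] else [a])

theorem pvEsc_nil (l : List Char) : pvEsc [] l = l := by
  simp [pvEsc]

theorem pvEsc_step (P : List Char) (c : Char) (l : List Char)
    (hb : c ≠ '\\') (hc : c ∉ P) :
    (pvEsc P l).flatMap (fun a => if a = c then ['\\', c] else [a]) = pvEsc (P ++ [c]) l := by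
  induction l with
  | nil => simp [pvEsc]
  | cons a t ih =>
    simp only [pvEsc, List.flatMap_cons, List.flatMap_append] at *
    rw [ih]
    congr 1
    by_cases ha : a ∈ P
    · have hane : a ≠ c := by intro h; subst h; exact hc ha
      simp [ha, hane, Ne.symm hb]
    · by_cases hac : a = c
      · subst hac; simp [ha]
      · simp [ha, hac]

theorem pvEsc_fold (ws : List Char) :
    ∀ (P : List Char) (l : List Char), ws.Nodup → (∀ c ∈ ws, c ≠ '\\') →
      (∀ c ∈ ws, c ∉ P) →
      ws.foldl (fun s c => s.flatMap (fun a => if a = c then ['\\', c] else [a])) (pvEsc P l)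
        = pvEsc (P ++ ws) l := by
  induction ws with
  | nil => intro P l _ _ _; simp
  | cons c rest ih =>
    intro P l hnd hb hP
    simp only [List.foldl_cons]
    rw [pvEsc_step P c l (hb c (by simp)) (hP c (by simp))]
    rw [ih (P ++ [c]) l hnd.of_cons (fun c' h => hb c' (by simp [h]))
        (fun c' h => by
          have h1 : c' ∉ P := hP c' (by simp [h])
          have h2 : c' ≠ c := by
            intro hh; subst hh; exact (List.nodup_cons.mp hnd).1 h
          simp [h1, h2])]
    simp

-- string-level fold over singleton-words → char-level fold
theorem pv_fold_toList (cs : List Char) :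
    ∀ (msg : String),
      (cs.foldl (fun (m : String) c => PySem.Str.replace m (String.ofList [c]) ("\\" ++ String.ofList [c])) msg).toList
        = cs.foldl (fun s c => s.flatMap (fun a => if a = c then ['\\', c] else [a])) msg.toList := by
  induction cs with
  | nil => intro msg; rfl
  | cons c t ih =>
    intro msg
    simp only [List.foldl_cons]
    rw [ih]
    congr 1
    rw [PySem.Str.toList_replace]
    have h1 : (String.ofList [c]).toList = [c] := String.toList_ofList
    have h2 : ("\\" ++ String.ofList [c]).toList = ['\\', c] := by
      simp
    rw [h1, h2, pv_replace_single]

-- the remove-loop under Pre_ computes a filter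
theorem pv_remove_fold (l : List String) :
    ∀ (base : List String), l.Nodup → (∀ w ∈ l, w ∈ base) → base.Nodup →
      l.foldl (fun acc w => (PySem.List.remove? acc w).getD acc) base
        = base.filter (fun w => decide (w ∉ l)) := by
  induction l with
  | nil => intro base _ _ _; simp
  | cons w rest ih =>
    intro base hnd hsub hbnd
    simp only [List.foldl_cons]
    rw [PySem.List.remove?_eq_some_erase base w (hsub w (by simp))]
    simp only [Option.getD_some]
    rw [ih (base.erase w) hnd.of_cons
        (fun w' h => by
          have hw' : w' ∈ base := hsub w' (by simp [h])
          have : w' ≠ w := by intro hh; subst hh; exact (List.nodup_cons.mp hnd).1 h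
          exact List.mem_erase_of_ne this |>.mpr hw')
        (hbnd.erase w)]
    rw [hbnd.erase_eq_filter w]
    rw [List.filter_filter]
    apply List.filter_congr
    intro x _
    by_cases h1 : x = w
    · subst h1; simp
    · by_cases h2 : x ∈ rest <;> simp [h1, h2]

-- the 18 reserved words are the singleton strings over the reserved characters
theorem pv_reserved_map :
    pvReservedA = ("_*[]()~`>#+-=|{}.!".toList).map (fun c => String.ofList [c]) := by rfl

theorem pv_chars_ok :
    (("_*[]()~`>#+-=|{}.!".toList).Nodup ∧ ∀ c ∈ ("_*[]()~`>#+-=|{}.!".toList), c ≠ '\\') := by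
  constructor
  · show (['_','*','[',']','(',')','~','`','>','#','+','-','=','|','{','}','.','!'] : List Char).Nodup
    decide
  · have h : (['_','*','[',']','(',')','~','`','>','#','+','-','=','|','{','}','.','!'] : List Char).all
        (fun c => c != '\\') = true := by decide
    show ∀ c ∈ (['_','*','[',']','(',')','~','`','>','#','+','-','=','|','{','}','.','!'] : List Char), c ≠ '\\'
    intro c hc
    simpa using List.all_eq_true.mp h c hc

-- the main engine: A's fold over the singleton words of cs equals B-style escaping with cs
theorem pv_main (cs : List Char) (msg : String)
    (hnd : cs.Nodup) (hb : ∀ c ∈ cs, c ≠ '\\') :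
    (cs.map (fun c => String.ofList [c])).foldl (fun m w => PySem.Str.replace m w ("\\" ++ w)) msg
      = String.ofList (msg.toList.flatMap (fun c => if cs.contains c then ['\\', c] else [c])) := by
  have h1 : (cs.map (fun c => String.ofList [c])).foldl (fun m w => PySem.Str.replace m w ("\\" ++ w)) msg
      = cs.foldl (fun (m : String) c => PySem.Str.replace m (String.ofList [c]) ("\\" ++ String.ofList [c])) msg := by
    rw [List.foldl_map]
  rw [h1]
  have h2 := pv_fold_toList cs msg
  have h3 : cs.foldl (fun s c => s.flatMap (fun a => if a = c then ['\\', c] else [a])) msg.toList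
      = pvEsc cs msg.toList := by
    have := pvEsc_fold cs [] msg.toList hnd hb (fun c _ => List.not_mem_nil)
    rw [pvEsc_nil] at this
    simpa using this
  have h4 : (cs.foldl (fun (m : String) c => PySem.Str.replace m (String.ofList [c]) ("\\" ++ String.ofList [c])) msg).toList
      = pvEsc cs msg.toList := by rw [h2, h3]
  have := congrArg String.ofList h4
  simpa [pvEsc, List.contains_eq_mem] using this

-- ===== VERDICT (by name: the statement is the Claim_ definition above) =====
theorem parse_markdown_v2_spec : Claim_equal_parse_markdown_v2 := by
  unfold Claim_equal_parse_markdown_v2 Spec_parse_markdown_v2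
  intro msg exclude _ hpre
  unfold parse_markdown_v2 parse_markdown_v2_alt
  match exclude with
  | none =>
      simp only
      rw [pv_reserved_map, pv_main _ _ pv_chars_ok.1 pv_chars_ok.2]
      simp
  | some l =>
      by_cases hl : l = []
      · subst hl
        simp only [ne_eq, not_true_eq_false, if_false]
        rw [pv_reserved_map, pv_main _ _ pv_chars_ok.1 pv_chars_ok.2]
        simp
      · obtain ⟨hnd, hsub⟩ := hpre
        have hsub' : ∀ w ∈ l, w ∈ pvReservedA := by
          intro w h; exact hsub w h
        simp only [ne_eq, hl, not_false_eq_true, if_true]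
        rw [pv_remove_fold l pvReservedA hnd hsub' (by decide)]
        rw [pv_reserved_map, List.filter_map]
        simp only [Function.comp_def]
        set cs := ("_*[]()~`>#+-=|{}.!".toList).filter
            (fun c => decide ((String.ofList [c]) ∉ l)) with hcs
        rw [pv_main cs msg (pv_chars_ok.1.filter _)
            (fun c hc => pv_chars_ok.2 c (List.mem_of_mem_filter hc))]
        have hle : l.isEmpty = false := by simpa using hl
        have hset : ("_*[]()~`>#+-=|{}.!".toList).filter
            (fun c => !(!l.isEmpty && l.contains (String.ofList [c]))) = cs := by
          rw [hcs]
          apply List.filter_congr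
          intro c _
          simp [hle, List.contains_eq_mem]
        rw [hset]
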